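-- pv_equiv track=rewrite | github.com/RobertLopez893/cuatro-en-linea | main.py | revisar_columnas
-- ===== SOURCE A (Python) =====
-- def revisar_columnas(tablero, color):
--     columnas = len(tablero[0])
--     filas = len(tablero)
--     for col in range(columnas):
--         contador = 0
--         for fila in range(filas):
--             if tablero[fila][col] == color:
--                 contador += 1
--                 if contador == 4:
--                     return True
--             else:
--                 contador = 0
--     return False
-- ===== SOURCE B (Python) =====
-- def revisar_columnas(tablero, color):
--     columnas = len(tablero[0])
--     filas = len(tablero)
--     for col in range(columnas):
--         for fila in range(filas - 3):
--             if all(tablero[fila + k][col] == color for k in range(4)):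
--                 return True
--     return False
-- ===== Notes on version B (the rewrite author's own statement) =====
-- stated objective: alternative
-- what changed: Replaces A's running-counter accumulator per column with explicit fixed-size 4-cell window checks (any window of range(filas-3) with all four cells equal to color).
-- outside the precondition, e.g. on revisar_columnas([['R', 'B'], ['R'], ['R', 'B'], ['R', 'B'], ['R', 'B']], 'R'): A returns True, B returns True
import Mathlib
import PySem

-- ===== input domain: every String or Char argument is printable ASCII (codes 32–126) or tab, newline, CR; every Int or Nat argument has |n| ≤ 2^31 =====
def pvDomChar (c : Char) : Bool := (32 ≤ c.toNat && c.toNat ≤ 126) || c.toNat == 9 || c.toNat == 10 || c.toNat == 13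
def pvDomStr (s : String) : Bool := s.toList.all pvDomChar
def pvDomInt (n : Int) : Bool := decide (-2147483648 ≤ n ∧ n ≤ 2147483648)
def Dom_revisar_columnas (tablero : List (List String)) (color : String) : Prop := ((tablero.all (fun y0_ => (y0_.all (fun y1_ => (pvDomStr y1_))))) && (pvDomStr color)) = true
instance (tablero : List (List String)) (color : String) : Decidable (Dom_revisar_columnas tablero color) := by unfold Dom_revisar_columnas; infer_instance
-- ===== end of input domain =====

-- B replaces A's running-counter column scan with fixed-size 4-cell window checks; objective: alternative decomposition, same cost.


-- ===== PORT A =====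
-- A's inner loop over fila with a running counter and early return at counter == 4.
def revColScan (rows : List (List String)) (col : Nat) (color : String) (cnt : Nat) : Bool :=
  match rows with
  | [] => false
  | r :: rs =>
    if r.getD col "" == color then
      if cnt + 1 == 4 then true else revColScan rs col color (cnt + 1)
    else revColScan rs col color 0

def revisar_columnas (tablero : List (List String)) (color : String) : Bool :=
  let columnas := (tablero.headD []).length
  (List.range columnas).any (fun col => revColScan tablero col color 0)

-- ===== PORT B =====
def revisar_columnas_alt (tablero : List (List String)) (color : String) : Bool :=
  let columnas := (tablero.headD []).length
  let filas := tablero.length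
  (List.range columnas).any (fun col =>
    (List.range (filas - 3)).any (fun fila =>
      (List.range 4).all (fun k => (tablero.getD (fila + k) []).getD col "" == color)))

-- ===== PRECONDITION & SPEC =====
-- Pre_ excludes the empty board (A raises IndexError on tablero[0]) and ragged boards
-- with some row shorter than the first row (A raises IndexError on tablero[fila][col]
-- unless it returns True before reaching that cell; uniform shape is stated as the
-- closed form, so a few True-returning ragged boards are also excluded).
def Pre_revisar_columnas (tablero : List (List String)) (color : String) : Prop :=
  tablero ≠ [] ∧ ∀ r ∈ tablero, (tablero.headD []).length ≤ r.length
instance (tablero : List (List String)) (color : String) : Decidable (Pre_revisar_columnas tablero color) := by unfold Pre_revisar_columnas; infer_instance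

def pvWitness_revisar_columnas : List (List String) × String :=
  ([["R"], ["R"], ["R"], ["R"]], "R")

def Spec_revisar_columnas (tablero : List (List String)) (color : String) (out : Bool) : Prop := out = revisar_columnas_alt tablero color
instance (tablero : List (List String)) (color : String) (out : Bool) : Decidable (Spec_revisar_columnas tablero color out) := by unfold Spec_revisar_columnas; infer_instance

-- ===== CLAIM (what is proved, stated in full; the proofs are below) =====
def Claim_equal_revisar_columnas : Prop := ∀ (tablero : List (List String)) (color : String), Dom_revisar_columnas tablero color → Pre_revisar_columnas tablero color → Spec_revisar_columnas tablero color (revisar_columnas tablero color)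

-- ===== LEMMAS AND PROOFS =====

-- Boolean abstractions of one column: a list of "cell == color" flags.
def pvPref : Nat → List Bool → Bool
  | 0, _ => true
  | _ + 1, [] => false
  | n + 1, b :: bs => b && pvPref n bs

def pvWin : List Bool → Bool
  | [] => false
  | b :: bs => pvPref 4 (b :: bs) || pvWin bs

def pvScan : List Bool → Nat → Bool
  | [], _ => false
  | b :: bs, cnt => if b then (if cnt + 1 == 4 then true else pvScan bs (cnt + 1)) else pvScan bs 0

theorem pvPref_mono : ∀ (l : List Bool) (m n : Nat), n ≤ m → pvPref m l = true → pvPref n l = true := by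
  intro l
  induction l with
  | nil => intro m n hnm h; cases m with
    | zero => interval_cases n; exact h
    | succ m => simp [pvPref] at h
  | cons b bs ih =>
    intro m n hnm h
    cases n with
    | zero => rfl
    | succ n =>
      cases m with
      | zero => omega
      | succ m =>
        simp only [pvPref, Bool.and_eq_true] at h ⊢
        exact ⟨h.1, ih m n (by omega) h.2⟩

theorem pvPref_length : ∀ (l : List Bool) (n : Nat), pvPref n l = true → n ≤ l.length := by
  intro l
  induction l with
  | nil => intro n h; cases n with
    | zero => simp
    | succ n => simp [pvPref] at h
  | cons b bs ih =>
    intro n h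
    cases n with
    | zero => simp
    | succ n =>
      simp only [pvPref, Bool.and_eq_true] at h
      have := ih n h.2
      simp; omega

theorem pvWin_of_pref (l : List Bool) (h : pvPref 4 l = true) : pvWin l = true := by
  cases l with
  | nil => simp [pvPref] at h
  | cons b bs => simp [pvWin, h]

theorem pvScan_eq (l : List Bool) : ∀ cnt : Nat, cnt ≤ 3 → pvScan l cnt = (pvPref (4 - cnt) l || pvWin l) := by
  induction l with
  | nil =>
    intro cnt h
    have : 4 - cnt = (3 - cnt) + 1 := by omega
    simp [pvScan, pvWin, this, pvPref]
  | cons b bs ih =>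
    intro cnt h
    by_cases hb : b = true
    · subst hb
      by_cases h3 : cnt = 3
      · subst h3
        simp [pvScan, pvPref, pvWin]
      · have hlt : cnt + 1 ≤ 3 := by omega
        have : pvScan (true :: bs) cnt = pvScan bs (cnt + 1) := by
          simp [pvScan]; omega
        rw [this, ih (cnt + 1) hlt]
        have h4 : 4 - cnt = (4 - (cnt + 1)) + 1 := by omega
        rw [h4]
        simp only [pvPref, pvWin, Bool.true_and]
        -- goal: p' || w = p' || (pvPref 4 (true::bs) || w) with p' = pvPref (4-(cnt+1)) bs
        have h5 : 4 - (cnt + 1) = 3 - cnt := by omega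
        rw [h5]
        cases hp : pvPref 4 (true :: bs) with
        | false =>
          have h3' : pvPref 3 bs = false := by
            simpa [pvPref] using hp
          simp [h3']
        | true =>
          have h3' : pvPref 3 bs = true := by
            simp only [pvPref, Bool.true_and] at hp; exact hp
          have h6 := pvPref_mono bs 3 (3 - cnt) (by omega) h3'
          simp [h3', h6]
    · have hbf : b = false := by simpa using hb
      subst hbf
      have : pvScan (false :: bs) cnt = pvScan bs 0 := by simp [pvScan]
      rw [this, ih 0 (by omega)]
      have h4 : 4 - cnt = (3 - cnt) + 1 := by omega
      simp only [h4, pvPref, pvWin, Bool.false_and, Bool.false_or]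
      cases hp : pvPref 4 bs with
      | false => simp
      | true => simp [pvWin_of_pref bs hp]

theorem pvWin_iff (l : List Bool) : pvWin l = true ↔ ∃ i, pvPref 4 (l.drop i) = true := by
  induction l with
  | nil =>
    constructor
    · intro h; simp [pvWin] at h
    · rintro ⟨i, hi⟩; simp [pvPref] at hi
  | cons b bs ih =>
    constructor
    · intro h
      simp only [pvWin, Bool.or_eq_true] at h
      rcases h with h | h
      · exact ⟨0, h⟩
      · obtain ⟨i, hi⟩ := ih.mp h
        exact ⟨i + 1, hi⟩
    · rintro ⟨i, hi⟩
      cases i with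
      | zero => simp only [pvWin, Bool.or_eq_true]; exact Or.inl hi
      | succ i =>
        simp only [pvWin, Bool.or_eq_true]
        exact Or.inr (ih.mpr ⟨i, hi⟩)

theorem revColScan_eq_pvScan (rows : List (List String)) (col : Nat) (color : String) :
    ∀ cnt, revColScan rows col color cnt = pvScan (rows.map (fun r => r.getD col "" == color)) cnt := by
  induction rows with
  | nil => intro cnt; rfl
  | cons r rs ih =>
    intro cnt
    simp only [revColScan, List.map, pvScan]
    by_cases h : (r.getD col "" == color) = true
    · simp [ih]
    · simp at h; simp [ih]

theorem pvPref4_getD (t : List Bool) :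
    pvPref 4 t = (t.getD 0 false && (t.getD 1 false && (t.getD 2 false && t.getD 3 false))) := by
  match t with
  | [] => rfl
  | [a] => simp [pvPref]
  | [a, b] => simp [pvPref]
  | [a, b, c] => simp [pvPref]
  | a :: b :: c :: d :: rest => simp [pvPref]

theorem range4_eq : List.range 4 = [0, 1, 2, 3] := by decide

-- the inner all over range 4 equals the window predicate on the mapped column, when the window fits
theorem inner_all_eq (tablero : List (List String)) (color : String) (col fila : Nat)
    (h : fila + 4 ≤ tablero.length) :
    ((List.range 4).all (fun k => (tablero.getD (fila + k) []).getD col "" == color)) =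
      pvPref 4 ((tablero.map (fun r => r.getD col "" == color)).drop fila) := by
  set f : List String → Bool := fun r => (r.getD col "" == color) with hf
  have hget : ∀ k, k < 4 → ((tablero.getD (fila + k) []).getD col "" == color)
      = (((tablero.map f).drop fila).getD k false) := by
    intro k hk
    have h1 : fila + k < tablero.length := by omega
    have h2 : k < ((tablero.map f).drop fila).length := by
      simp [List.length_drop]; omega
    rw [List.getD_eq_getElem _ _ h1, List.getD_eq_getElem _ _ h2]
    simp [hf]
  rw [pvPref4_getD, range4_eq]
  simp only [List.all_cons, List.all_nil, Bool.and_true]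
  rw [hget 0 (by omega), hget 1 (by omega), hget 2 (by omega), hget 3 (by omega)]

theorem col_eq (tablero : List (List String)) (color : String) (col : Nat) :
    revColScan tablero col color 0 =
      (List.range (tablero.length - 3)).any (fun fila =>
        (List.range 4).all (fun k => (tablero.getD (fila + k) []).getD col "" == color)) := by
  set f : List String → Bool := fun r => (r.getD col "" == color) with hf
  set l : List Bool := tablero.map f with hl
  have hlen : l.length = tablero.length := by simp [hl]
  rw [revColScan_eq_pvScan, ← hf, ← hl, pvScan_eq l 0 (by omega)]
  have habs : (pvPref 4 l || pvWin l) = pvWin l := by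
    cases hp : pvPref 4 l with
    | false => simp
    | true => simp [pvWin_of_pref l hp]
  rw [habs]
  cases hw : pvWin l with
  | true =>
    obtain ⟨i, hi⟩ := (pvWin_iff l).mp hw
    have hbound : i + 4 ≤ tablero.length := by
      have := pvPref_length _ _ hi
      simp [List.length_drop, hlen] at this
      omega
    have hmem : i ∈ List.range (tablero.length - 3) := by
      simp [List.mem_range]; omega
    symm
    rw [List.any_eq_true]
    exact ⟨i, hmem, by rw [inner_all_eq tablero color col i hbound, ← hf, ← hl]; exact hi⟩
  | false =>
    symm
    rw [List.any_eq_false]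
    intro fila hmem
    simp only [List.mem_range] at hmem
    have hbound : fila + 4 ≤ tablero.length := by omega
    rw [inner_all_eq tablero color col fila hbound, ← hf, ← hl]
    intro hp
    have := (pvWin_iff l).mpr ⟨fila, hp⟩
    rw [hw] at this; exact absurd this (by simp)

-- ===== VERDICT (by name: the statement is the Claim_ definition above) =====
theorem revisar_columnas_spec : Claim_equal_revisar_columnas := by
  intro tablero color _ _
  unfold Spec_revisar_columnas revisar_columnas revisar_columnas_alt
  simp only []
  congr 1
  funext col
  exact col_eq tablero color col
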